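-- pv_equiv track=rewrite | github.com/eliswanson-db/dbxmetagen | app/app_old.py | validate_table_names
-- ===== SOURCE A (Python) =====
-- from typing import Dict, Any, Optional, List, Tuple
--
-- def validate_table_names(table_names: List[str]) -> tuple[List[str], List[str]]:
--     """Validate table names and return valid/invalid lists with detailed feedback"""
--     valid_tables = []
--     invalid_tables = []
--
--     for table in table_names:
--         table = table.strip()
--         if not table:
--             continue
--
--         # Check format: catalog.schema.table
--         parts = table.split(".")
--         if len(parts) != 3:
--             invalid_tables.append(
--                 f"{table} (invalid format - need catalog.schema.table)"
--             )
--             continue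
--
--         catalog, schema, table_name = parts
--
--         # Check for empty parts
--         if not all(part.strip() for part in parts):
--             invalid_tables.append(f"{table} (contains empty parts)")
--             continue
--
--         # Check for valid characters (alphanumeric, underscore, hyphen)
--         if not all(part.replace("_", "").replace("-", "").isalnum() for part in parts):
--             invalid_tables.append(
--                 f"{table} (invalid characters - use only letters, numbers, _, -)"
--             )
--             continue
--
--         # Check length (reasonable limits)
--         if any(len(part) > 100 for part in parts):
--             invalid_tables.append(f"{table} (part too long - max 100 characters)")
--             continue
--
--         valid_tables.append(table)
--
--     return valid_tables, invalid_tables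
-- ===== SOURCE B (Python) =====
-- from typing import List
--
--
-- def _classify(table: str):
--     """One left-to-right scan over the characters: count the dots and fold
--     per-part stats (length, has a non-space char, chars all allowed, has a
--     char besides _/-) into four failure flags; return the message suffix of
--     the highest-priority failure, or None if the name is valid."""
--     ndots = 0
--     any_empty = any_bad = any_long = False
--     plen = 0
--     has_nonws = solid = False
--     allowed = True
--     for c in table + ".":  # sentinel dot finalizes the last part
--         if c == ".":
--             ndots += 1
--             any_empty = any_empty or not has_nonws
--             any_bad = any_bad or not (allowed and solid)
--             any_long = any_long or plen > 100
--             plen, has_nonws, allowed, solid = 0, False, True, False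
--         else:
--             plen += 1
--             if not c.isspace():
--                 has_nonws = True
--             if not (c.isalnum() or c in "_-"):
--                 allowed = False
--             if c not in "_-":
--                 solid = True
--     if ndots != 3:  # sentinel added one
--         return " (invalid format - need catalog.schema.table)"
--     if any_empty:
--         return " (contains empty parts)"
--     if any_bad:
--         return " (invalid characters - use only letters, numbers, _, -)"
--     if any_long:
--         return " (part too long - max 100 characters)"
--     return None
--
--
-- def validate_table_names(table_names: List[str]) -> tuple:
--     valid_tables = []
--     invalid_tables = []
--     for raw in table_names:
--         table = raw.strip()
--         if not table:
--             continue
--         msg = _classify(table)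
--         if msg is None:
--             valid_tables.append(table)
--         else:
--             invalid_tables.append(table + msg)
--     return valid_tables, invalid_tables
-- ===== Notes on version B (the rewrite author's own statement) =====
-- stated objective: alternative
-- what changed: Replaced A's split('.') plus four separate whole-parts passes (strip/replace/isalnum/len per part) by a single character-level state machine that scans each name once, counting dots and folding per-part stats into four failure flags, then picks the highest-priority failure message.
import Mathlib
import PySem

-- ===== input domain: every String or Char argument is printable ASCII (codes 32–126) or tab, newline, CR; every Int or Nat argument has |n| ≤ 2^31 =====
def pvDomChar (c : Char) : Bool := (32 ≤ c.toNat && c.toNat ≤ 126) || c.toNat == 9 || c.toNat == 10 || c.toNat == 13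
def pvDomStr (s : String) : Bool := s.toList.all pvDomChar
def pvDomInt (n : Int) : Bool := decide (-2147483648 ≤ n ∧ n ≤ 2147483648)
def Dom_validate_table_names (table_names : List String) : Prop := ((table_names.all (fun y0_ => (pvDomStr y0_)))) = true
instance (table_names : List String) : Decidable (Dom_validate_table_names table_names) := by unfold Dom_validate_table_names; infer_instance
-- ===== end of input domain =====

-- B replaces A's split('.') + four whole-parts passes by a single character-level
-- state machine per name (one pass; same results, picked by failure priority).

-- ===== PORT A =====
-- literal transliteration of A's loop body: strip; skip if empty; split on '.'; four
-- sequential checks, each appending its message and 'continue'-ing; else append to valid.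
-- (the unused destructuring 'catalog, schema, table_name = parts' is omitted)
def pvStepA (acc : List String × List String) (table0 : String) : List String × List String :=
  let table := PySem.Str.strip table0
  if table == "" then acc
  else
    let parts := PySem.Chars.splitOn table.toList ['.']
    if parts.length ≠ 3 then
      (acc.1, acc.2 ++ [table ++ " (invalid format - need catalog.schema.table)"])
    else if !(parts.all fun part => !(PySem.Chars.strip part == [])) then
      (acc.1, acc.2 ++ [table ++ " (contains empty parts)"])
    else if !(parts.all fun part =>
          PySem.Chars.strIsalnum (PySem.Chars.replace (PySem.Chars.replace part ['_'] []) ['-'] [])) then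
      (acc.1, acc.2 ++ [table ++ " (invalid characters - use only letters, numbers, _, -)"])
    else if parts.any fun part => decide (PySem.Chars.len part > 100) then
      (acc.1, acc.2 ++ [table ++ " (part too long - max 100 characters)"])
    else
      (acc.1 ++ [table], acc.2)

def validate_table_names (table_names : List String) : List String × List String :=
  table_names.foldl pvStepA ([], [])

-- ===== PORT B =====
-- Source B's scanner state: dot count, the four failure flags, and the running
-- stats of the current part (length, has non-space char, all chars allowed, has a char besides _/-)
structure pvScanSt where
  ndots : Nat
  anyEmpty : Bool
  anyBad : Bool
  anyLong : Bool
  plen : Int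
  hasNonws : Bool
  allowed : Bool
  solid : Bool
  deriving Repr, DecidableEq

def pvScanInit : pvScanSt := ⟨0, false, false, false, 0, false, true, false⟩

-- one character of Source B's scan loop
def pvScanStep (st : pvScanSt) (c : Char) : pvScanSt :=
  if c == '.' then
    ⟨st.ndots + 1,
     st.anyEmpty || !st.hasNonws,
     st.anyBad || !(st.allowed && st.solid),
     st.anyLong || decide (st.plen > 100),
     0, false, true, false⟩
  else
    ⟨st.ndots, st.anyEmpty, st.anyBad, st.anyLong,
     st.plen + 1,
     st.hasNonws || !PySem.Chars.isspace c,
     st.allowed && (PySem.Chars.isalnum c || c == '_' || c == '-'),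
     st.solid || !(c == '_' || c == '-')⟩

-- Source B's _classify: scan table+'.' once, then pick the highest-priority failure
def pvClassify (table : List Char) : Option String :=
  let st := (table ++ ['.']).foldl pvScanStep pvScanInit
  if st.ndots ≠ 3 then some " (invalid format - need catalog.schema.table)"
  else if st.anyEmpty then some " (contains empty parts)"
  else if st.anyBad then some " (invalid characters - use only letters, numbers, _, -)"
  else if st.anyLong then some " (part too long - max 100 characters)"
  else none

-- Source B's loop body
def pvStepB (acc : List String × List String) (raw : String) : List String × List String :=
  let table := PySem.Str.strip raw
  if table == "" then acc
  else
    match pvClassify table.toList with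
    | some msg => (acc.1, acc.2 ++ [table ++ msg])
    | none => (acc.1 ++ [table], acc.2)

def validate_table_names_alt (table_names : List String) : List String × List String :=
  table_names.foldl pvStepB ([], [])

-- ===== PRECONDITION & SPEC =====
def Spec_validate_table_names (table_names : List String) (out : List String × List String) : Prop := out = validate_table_names_alt table_names
instance (table_names : List String) (out : List String × List String) : Decidable (Spec_validate_table_names table_names out) := by unfold Spec_validate_table_names; infer_instance

-- ===== CLAIM (what is proved, stated in full; the proofs are below) =====
def Claim_equal_validate_table_names : Prop := ∀ (table_names : List String), Dom_validate_table_names table_names → Spec_validate_table_names table_names (validate_table_names table_names)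

-- ===== LEMMAS AND PROOFS =====

-- proof-side structural split on '.', current part carried in forward order
def pvFsplit : List Char → List Char → List (List Char)
  | [], cur => [cur]
  | c :: t, cur => if c == '.' then cur :: pvFsplit t [] else pvFsplit t (cur ++ [c])

lemma pvSplitOn_go_eq (l : List Char) : ∀ (fuel : Nat) (cur : List Char) (accs : List (List Char)),
    l.length ≤ fuel →
    PySem.Chars.splitOn.go ['.'] fuel l cur accs = accs.reverse ++ pvFsplit l cur.reverse := by
  induction l with
  | nil =>
    intro fuel cur accs _
    cases fuel <;> simp [PySem.Chars.splitOn.go, pvFsplit]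
  | cons c t ih =>
    intro fuel cur accs h
    cases fuel with
    | zero => simp at h
    | succ f =>
      simp only [PySem.Chars.splitOn.go, List.isPrefixOf, pvFsplit]
      by_cases hc : c == '.'
      · rw [beq_iff_eq] at hc; subst hc
        simp only [beq_self_eq_true, Bool.true_and, if_pos, List.drop, List.length]
        rw [ih f [] (cur.reverse :: accs) (by simpa using h)]
        simp
      · have hc' : ('.' == c) = false := by
          simp only [beq_eq_false_iff_ne, ne_eq]; intro e; exact hc (by simp [e.symm])
        simp only [hc', Bool.false_and, Bool.false_eq_true, if_false]
        rw [ih f (c :: cur) accs (by simpa using h)]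
        simp [hc]

lemma pvSplitOn_dot (cs : List Char) :
    PySem.Chars.splitOn cs ['.'] = pvFsplit cs [] := by
  rw [PySem.Chars.splitOn, pvSplitOn_go_eq cs (cs.length + 1) [] [] (by omega)]
  simp

lemma pvReplace_go_filter (d : Char) : ∀ (l : List Char) (fuel : Nat) (acc : List Char),
    l.length ≤ fuel →
    PySem.Chars.replace.go [d] [] fuel l acc = acc.reverse ++ l.filter (fun c => !(c == d)) := by
  intro l
  induction l with
  | nil =>
    intro fuel acc _
    cases fuel <;> simp [PySem.Chars.replace.go]
  | cons c t ih =>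
    intro fuel acc h
    cases fuel with
    | zero => simp at h
    | succ f =>
      simp only [PySem.Chars.replace.go]
      by_cases hc : d == c
      · rw [beq_iff_eq] at hc; subst hc
        simp only [List.isPrefixOf, beq_self_eq_true, Bool.true_and, if_pos, List.drop,
          List.length, List.reverse_nil, List.nil_append]
        rw [ih f acc (by simpa using h)]
        simp
      · have hc' : ([d].isPrefixOf (c :: t)) = false := by
          simp only [List.isPrefixOf]; simp; intro e; exact hc (by simp [e])
        simp only [hc', Bool.false_eq_true, if_false]
        rw [ih f (c :: acc) (by simpa using h)]
        have : (!(c == d)) = true := by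
          simp only [Bool.not_eq_true', beq_eq_false_iff_ne, ne_eq]
          intro e; exact hc (by simp [e.symm])
        simp [List.filter, this]

lemma pvReplace_filter (d : Char) (cs : List Char) :
    PySem.Chars.replace cs [d] [] = cs.filter (fun c => !(c == d)) := by
  rw [PySem.Chars.replace]
  simp only [List.isEmpty, Bool.false_eq_true, if_false]
  rw [pvReplace_go_filter d cs cs.length [] (le_refl _)]
  simp

lemma pvEmptyPart_eq (p : List Char) :
    (PySem.Chars.strip p == []) = !(p.any fun c => !PySem.Chars.isspace c) := by
  rw [Bool.eq_iff_iff]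
  simp only [beq_iff_eq, Bool.not_eq_true', List.any_eq_false, Bool.not_eq_false]
  simp only [PySem.Chars.strip, PySem.Chars.lstrip, PySem.Chars.rstrip,
    List.reverse_eq_nil_iff, List.dropWhile_eq_nil_iff, List.mem_reverse]
  constructor
  · intro h x hx
    have hx' : x ∈ p.takeWhile PySem.Chars.isspace ++ p.dropWhile PySem.Chars.isspace := by
      rw [List.takeWhile_append_dropWhile]; exact hx
    rcases List.mem_append.mp hx' with h1 | h1
    · exact List.mem_takeWhile_imp h1
    · exact h x h1
  · intro h x hx
    exact h x ((List.dropWhile_sublist _).subset hx)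

lemma pvBadPart_eq (p : List Char) :
    PySem.Chars.strIsalnum (PySem.Chars.replace (PySem.Chars.replace p ['_'] []) ['-'] [])
      = (p.all (fun c => PySem.Chars.isalnum c || c == '_' || c == '-')
          && p.any (fun c => !(c == '_' || c == '-'))) := by
  rw [pvReplace_filter, pvReplace_filter, PySem.Chars.strIsalnum, Bool.eq_iff_iff]
  simp only [List.filter_filter, Bool.and_eq_true, List.all_eq_true, List.any_eq_true,
    List.isEmpty_eq_false_iff, ne_eq, List.filter_eq_nil_iff, not_forall,
    List.mem_filter, beq_iff_eq, Bool.not_eq_true', beq_eq_false_iff_ne,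
    Bool.or_eq_true]
  constructor
  · rintro ⟨⟨x, hx, hfx⟩, hall⟩
    refine ⟨fun c hc => ?_, ⟨x, hx, ?_⟩⟩
    · by_cases h1 : c = '_'
      · simp [h1]
      · by_cases h2 : c = '-'
        · simp [h2]
        · have := hall c ⟨hc, by simp [h1, h2]⟩
          simp [this]
    · revert hfx; by_cases h1 : x = '_' <;> by_cases h2 : x = '-' <;> simp [h1, h2]
  · rintro ⟨hall, x, hx, hsx⟩
    constructor
    · refine ⟨x, hx, ?_⟩
      revert hsx; by_cases h1 : x = '_' <;> by_cases h2 : x = '-' <;> simp [h1, h2]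
    · rintro c ⟨hc, hf⟩
      rcases hall c hc with (h | h) | h
      · exact h
      · exfalso; revert hf; simp [h]
      · exfalso; revert hf; simp [h]

-- scanner state determined by (dot count, flags, current part)
def pvPartSt (n : Nat) (e b lg : Bool) (p : List Char) : pvScanSt :=
  ⟨n, e, b, lg, PySem.Chars.len p,
   p.any (fun c => !PySem.Chars.isspace c),
   p.all (fun c => PySem.Chars.isalnum c || c == '_' || c == '-'),
   p.any (fun c => !(c == '_' || c == '-'))⟩

lemma pvScan_inv (cs : List Char) : ∀ (n : Nat) (e b lg : Bool) (p : List Char),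
    (cs ++ ['.']).foldl pvScanStep (pvPartSt n e b lg p) =
    pvPartSt (n + (pvFsplit cs p).length)
      (e || (pvFsplit cs p).any (fun q => !(q.any fun c => !PySem.Chars.isspace c)))
      (b || (pvFsplit cs p).any (fun q =>
        !(q.all (fun c => PySem.Chars.isalnum c || c == '_' || c == '-')
           && q.any (fun c => !(c == '_' || c == '-')))))
      (lg || (pvFsplit cs p).any (fun q => decide (PySem.Chars.len q > 100)))
      [] := by
  induction cs with
  | nil =>
    intro n e b lg p
    simp [pvFsplit, pvScanStep, pvPartSt]
  | cons c t ih =>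
    intro n e b lg p
    by_cases hc : c == '.'
    · rw [beq_iff_eq] at hc; subst hc
      have h1 : pvScanStep (pvPartSt n e b lg p) '.' =
          pvPartSt (n + 1)
            (e || !(p.any fun c => !PySem.Chars.isspace c))
            (b || !(p.all (fun c => PySem.Chars.isalnum c || c == '_' || c == '-')
                     && p.any (fun c => !(c == '_' || c == '-'))))
            (lg || decide (p.length > 100)) [] := by
        simp [pvScanStep, pvPartSt]
      simp only [List.cons_append, List.foldl_cons, h1, ih, pvFsplit, beq_self_eq_true, if_pos]
      simp [Bool.or_assoc, Nat.add_assoc, Nat.add_comm 1]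
    · have h1 : pvScanStep (pvPartSt n e b lg p) c = pvPartSt n e b lg (p ++ [c]) := by
        simp [pvScanStep, pvPartSt, hc, Bool.and_comm, Bool.or_comm]
      simp only [List.cons_append, List.foldl_cons, h1, ih, pvFsplit, hc, Bool.false_eq_true,
        if_false]

-- the scan's verdict, expressed over the split parts
lemma pvClassify_parts (cs : List Char) :
    pvClassify cs =
      (if (pvFsplit cs []).length ≠ 3 then some " (invalid format - need catalog.schema.table)"
       else if (pvFsplit cs []).any (fun q => !(q.any fun c => !PySem.Chars.isspace c)) then
         some " (contains empty parts)"
       else if (pvFsplit cs []).any (fun q =>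
           !(q.all (fun c => PySem.Chars.isalnum c || c == '_' || c == '-')
              && q.any (fun c => !(c == '_' || c == '-')))) then
         some " (invalid characters - use only letters, numbers, _, -)"
       else if (pvFsplit cs []).any (fun q => decide (PySem.Chars.len q > 100)) then
         some " (part too long - max 100 characters)"
       else none) := by
  unfold pvClassify
  rw [show pvScanInit = pvPartSt 0 false false false [] from rfl, pvScan_inv]
  simp [pvPartSt]

lemma pvStep_eq : pvStepA = pvStepB := by
  funext acc s
  unfold pvStepA pvStepB
  dsimp only
  by_cases h0 : PySem.Str.strip s == ""
  · simp only [h0, if_true]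
  · simp only [h0, Bool.false_eq_true, if_false]
    rw [pvClassify_parts, pvSplitOn_dot]
    simp only [pvEmptyPart_eq, pvBadPart_eq, Bool.not_not, List.not_all_eq_any_not]
    set parts := pvFsplit (PySem.Str.strip s).toList [] with hp
    by_cases h1 : parts.length ≠ 3
    · rw [if_pos h1, if_pos h1]
    · rw [if_neg h1, if_neg h1]
      cases h2 : parts.any (fun q => !(q.any fun c => !PySem.Chars.isspace c)) with
      | true => simp only [if_true]
      | false =>
        simp only [Bool.false_eq_true, if_false]
        cases h3 : parts.any (fun q =>
            !(q.all (fun c => PySem.Chars.isalnum c || c == '_' || c == '-')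
               && q.any (fun c => !(c == '_' || c == '-')))) with
        | true => simp only [if_true]
        | false =>
          simp only [Bool.false_eq_true, if_false]
          cases h4 : parts.any (fun q => decide (PySem.Chars.len q > 100)) with
          | true => simp only [if_true]
          | false => simp only [Bool.false_eq_true, if_false]

-- ===== VERDICT (by name: the statement is the Claim_ definition above) =====
theorem validate_table_names_spec : Claim_equal_validate_table_names := by
  intro table_names _
  unfold Spec_validate_table_names validate_table_names validate_table_names_alt
  rw [pvStep_eq]
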